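-- pv_equiv track=rewrite | github.com/leo2005222/pygame | TicTacToe/ptt_03_mouse.py | cell_to_board
-- ===== SOURCE A (Python) =====
-- CELL_SIZE = 150
--
-- def cell_to_board(tm_pos):
--     row = col = -1
--     for y in range(3):
--         if y * CELL_SIZE <= tm_pos[1] < (y + 1) * CELL_SIZE:
--             row = y
--
--     for x in range(3):
--         if x * CELL_SIZE <= tm_pos[0] < (x + 1) * CELL_SIZE:
--             col = x
--     return row, col
-- ===== SOURCE B (Python) =====
-- CELL_SIZE = 150
--
-- def cell_to_board(tm_pos):
--     x, y = tm_pos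
--     row = y // CELL_SIZE if 0 <= y < 3 * CELL_SIZE else -1
--     col = x // CELL_SIZE if 0 <= x < 3 * CELL_SIZE else -1
--     return row, col
-- ===== Notes on version B (the rewrite author's own statement) =====
-- stated objective: simpler
-- what changed: Replaces the two scan loops over candidate rows/columns with a direct bounds check plus one floor division per coordinate.
import Mathlib
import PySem

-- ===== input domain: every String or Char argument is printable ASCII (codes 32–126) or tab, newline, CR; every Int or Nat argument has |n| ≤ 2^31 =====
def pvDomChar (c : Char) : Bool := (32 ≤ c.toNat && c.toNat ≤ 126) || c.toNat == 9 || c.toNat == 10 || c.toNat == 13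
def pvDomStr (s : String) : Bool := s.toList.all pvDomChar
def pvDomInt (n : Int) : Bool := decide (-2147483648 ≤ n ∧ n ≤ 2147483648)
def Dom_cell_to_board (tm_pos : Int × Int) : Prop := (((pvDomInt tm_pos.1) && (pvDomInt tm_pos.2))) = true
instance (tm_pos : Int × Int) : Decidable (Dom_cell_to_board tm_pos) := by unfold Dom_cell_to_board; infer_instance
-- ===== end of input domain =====

-- ===== PORT A =====
-- literal port of A: two range(3) scans updating row/col
def cell_to_board (tm_pos : Int × Int) : Int × Int :=
  let row := (PySem.List.pyRange 0 3 1).foldl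
    (fun row y => if y * 150 ≤ tm_pos.2 ∧ tm_pos.2 < (y + 1) * 150 then y else row) (-1)
  let col := (PySem.List.pyRange 0 3 1).foldl
    (fun col x => if x * 150 ≤ tm_pos.1 ∧ tm_pos.1 < (x + 1) * 150 then x else col) (-1)
  (row, col)

-- ===== PORT B =====
-- port of B: bounds check + one floor division per coordinate
def cell_to_board_alt (tm_pos : Int × Int) : Int × Int :=
  let row := if 0 ≤ tm_pos.2 ∧ tm_pos.2 < 3 * 150 then PySem.Int.floordiv tm_pos.2 150 else -1
  let col := if 0 ≤ tm_pos.1 ∧ tm_pos.1 < 3 * 150 then PySem.Int.floordiv tm_pos.1 150 else -1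
  (row, col)

-- ===== PRECONDITION & SPEC =====
def Spec_cell_to_board (tm_pos : Int × Int) (out : Int × Int) : Prop := out = cell_to_board_alt tm_pos
instance (tm_pos : Int × Int) (out : Int × Int) : Decidable (Spec_cell_to_board tm_pos out) := by unfold Spec_cell_to_board; infer_instance

-- ===== CLAIM (what is proved, stated in full; the proofs are below) =====
def Claim_equal_cell_to_board : Prop := ∀ (tm_pos : Int × Int), Dom_cell_to_board tm_pos → Spec_cell_to_board tm_pos (cell_to_board tm_pos)

-- ===== LEMMAS AND PROOFS =====

-- ===== VERDICT (by name: the statement is the Claim_ definition above) =====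
-- one coordinate: the three-bucket scan equals the guarded floor division
lemma scan_eq_div (v : Int) :
    (PySem.List.pyRange 0 3 1).foldl
      (fun r y => if y * 150 ≤ v ∧ v < (y + 1) * 150 then y else r) (-1)
    = (if 0 ≤ v ∧ v < 3 * 150 then PySem.Int.floordiv v 150 else -1) := by
  have hr : PySem.List.pyRange 0 3 1 = [0, 1, 2] := by decide
  rw [hr]
  simp only [List.foldl]
  split_ifs with h0 h1 h2 hin hin hin h1 h2 hin <;> try omega
  · exact ((PySem.Int.floordiv_eq_iff_of_pos (by omega)).mpr (by omega)).symm
  · exact ((PySem.Int.floordiv_eq_iff_of_pos (by omega)).mpr (by omega)).symm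
  · exact ((PySem.Int.floordiv_eq_iff_of_pos (by omega)).mpr (by omega)).symm

theorem cell_to_board_spec : Claim_equal_cell_to_board := by
  intro tm_pos _
  unfold Spec_cell_to_board cell_to_board cell_to_board_alt
  rw [scan_eq_div, scan_eq_div]
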